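-- pv_equiv track=rewrite | github.com/kobolok/Coding_in_picture | main.py | blocking_to_bmp
-- ===== SOURCE A (Python) =====
-- def blocking_to_bmp(bin_code, side):
--     blocks = [[]]
--     border = '01'
--     k = 0
--     for x in range(7):
--         number_of_lines = 0
--         for y in range(10):
--             blocks.append([])
--             blocks[k].append(border[1] * (side + 2))
--             for j in range(side):
--                 line = "".join([border[j % 2], data_line(bin_code, side, number_of_lines, x), border[1]])
--                 blocks[k].append(line)
--                 number_of_lines += 1
--             blocks[k].append(border[1] * (side % 2) + border * int(side / 2 + 1))
--             k += 1
--     return blocks[:-1]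
--
-- def data_line(bin_code, side, k, bit):
--     line = ''
--     for i in range(k * side, (k + 1) * side):
--         line = "".join([line, bin_code[i][bit]])
--     return line
-- ===== SOURCE B (Python) =====
-- def blocking_to_bmp(bin_code, side):
--     top = '1' * (side + 2)
--     bottom = '1' * (side % 2) + '01' * int(side / 2 + 1)
--     total = 10 * side * side if side > 0 else 0
--     blocks = []
--     for x in range(7):
--         col = [bin_code[i][x] for i in range(total)]
--         for y in range(10):
--             block = [top]
--             for j in range(side):
--                 n = y * side + j
--                 block.append('01'[j % 2] + ''.join(col[n * side:(n + 1) * side]) + '1')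
--             block.append(bottom)
--             blocks.append(block)
--     return blocks
-- ===== Notes on version B (the rewrite author's own statement) =====
-- stated objective: simpler
-- what changed: B precomputes each bit's data once as a flat column list and slices it per line, assembling blocks by plain appends, instead of A's mutable blocks[k]-indexing with a running line counter and per-line data_line rescans that recompute every index range from scratch.
import Mathlib
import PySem

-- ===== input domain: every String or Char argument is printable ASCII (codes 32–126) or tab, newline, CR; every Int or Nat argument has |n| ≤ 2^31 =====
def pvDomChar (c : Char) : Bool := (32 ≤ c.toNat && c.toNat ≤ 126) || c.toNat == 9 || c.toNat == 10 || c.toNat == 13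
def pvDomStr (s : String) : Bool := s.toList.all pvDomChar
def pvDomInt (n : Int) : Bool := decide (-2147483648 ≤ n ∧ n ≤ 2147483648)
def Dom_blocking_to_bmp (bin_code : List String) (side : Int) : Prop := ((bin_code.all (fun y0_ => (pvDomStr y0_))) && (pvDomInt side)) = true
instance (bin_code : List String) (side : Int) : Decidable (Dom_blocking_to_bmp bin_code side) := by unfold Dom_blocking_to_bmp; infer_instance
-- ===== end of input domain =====

-- B builds each bit's data once as a flat column list and slices it, instead of A's
-- per-line index-by-index rescans through data_line; objective: simpler decomposition
-- (same asymptotic cost, no mutation-by-index bookkeeping).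

-- ===== shared Python-primitive helpers (both ports use these for s*n and s[i]) =====

-- Python s * n (string repetition; '' for n ≤ 0)
def pyStrMul (s : String) (n : Int) : String := String.ofList (PySem.List.pyRepeat s.toList n)

-- Python s[i] as a 1-char string; "" marks IndexError (those inputs are outside Pre_)
def pyStrIdx (s : String) (i : Int) : String :=
  match PySem.Str.pyGet? s i with
  | some c => String.ofList [c]
  | none => ""

-- Python bin_code[i][bit]; "" marks IndexError (outside Pre_)
def pyCharAt (bin_code : List String) (i : Int) (bit : Int) : String :=
  match PySem.List.pyGet? bin_code i with
  | some s => pyStrIdx s bit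
  | none => ""

-- ===== PORT A =====

-- helper data_line of A, literally: line = "".join([line, bin_code[i][bit]]) over range(k*side, (k+1)*side)
def data_line (bin_code : List String) (side : Int) (k : Int) (bit : Int) : String :=
  (PySem.List.pyRange (k * side) ((k + 1) * side) 1).foldl
    (fun line i => PySem.Str.join "" [line, pyCharAt bin_code i bit]) ""

-- one iteration of A's y-loop: state ((blocks, k), number_of_lines)
def aYStep (bin_code : List String) (side : Int) (x : Int)
    (st2 : (List (List String) × Int) × Int) (_y : Int) : (List (List String) × Int) × Int :=
  let blocks := st2.1.1 ++ [[]]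
  let k := st2.1.2
  let blocks := blocks.modify k.toNat (· ++ [pyStrMul (pyStrIdx "01" 1) (side + 2)])
  let p := (PySem.List.pyRange 0 side 1).foldl
      (fun (p : List (List String) × Int) j =>
        (p.1.modify k.toNat
          (· ++ [PySem.Str.join "" [pyStrIdx "01" (PySem.Int.mod j 2), data_line bin_code side p.2 x, pyStrIdx "01" 1]]),
         p.2 + 1))
      (blocks, st2.2)
  -- int(side / 2 + 1) = trunc((side+2)/2): exact for |side| ≤ 2^31 (float arithmetic is exact there)
  let blocks := p.1.modify k.toNat
      (· ++ [pyStrMul (pyStrIdx "01" 1) (PySem.Int.mod side 2) ++ pyStrMul "01" (PySem.Int.truncdiv (side + 2) 2)])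
  ((blocks, k + 1), p.2)

def blocking_to_bmp (bin_code : List String) (side : Int) : List (List String) :=
  let st := (PySem.List.pyRange 0 7 1).foldl
    (fun (st : List (List String) × Int) x =>
      ((PySem.List.pyRange 0 10 1).foldl (aYStep bin_code side x) (st, 0)).1)
    ([[]], 0)
  PySem.List.slice st.1 none (some (-1))

-- ===== PORT B =====

def blocking_to_bmp_alt (bin_code : List String) (side : Int) : List (List String) :=
  let top := pyStrMul "1" (side + 2)
  -- int(side / 2 + 1) = trunc((side+2)/2): exact for |side| ≤ 2^31
  let bottom := pyStrMul "1" (PySem.Int.mod side 2) ++ pyStrMul "01" (PySem.Int.truncdiv (side + 2) 2)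
  let total : Int := if side > 0 then 10 * side * side else 0
  (PySem.List.pyRange 0 7 1).foldl
    (fun blocks x =>
      let col := (PySem.List.pyRange 0 total 1).map (fun i => pyCharAt bin_code i x)
      (PySem.List.pyRange 0 10 1).foldl
        (fun blocks y =>
          let block := (PySem.List.pyRange 0 side 1).foldl
            (fun block j =>
              let n := y * side + j
              block ++ [pyStrIdx "01" (PySem.Int.mod j 2) ++
                        PySem.Str.join "" (PySem.List.slice col (some (n * side)) (some ((n + 1) * side))) ++
                        pyStrIdx "01" 1])
            [top]
          blocks ++ [block ++ [bottom]])
        blocks)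
    []

-- ===== PRECONDITION & SPEC =====
-- Pre_ excludes exactly the inputs on which A raises IndexError: with side ≥ 1 A reads
-- bin_code[i][x] for every i < 10*side² and every bit x < 7, so it needs at least
-- 10*side² strings each of length ≥ 7; with side < 1 A reads nothing and always returns.
def Pre_blocking_to_bmp (bin_code : List String) (side : Int) : Prop :=
  side < 1 ∨ (10 * side * side ≤ (bin_code.length : Int) ∧
               ∀ s ∈ bin_code.take (10 * side * side).toNat, 7 ≤ s.toList.length)
instance (bin_code : List String) (side : Int) : Decidable (Pre_blocking_to_bmp bin_code side) := by
  unfold Pre_blocking_to_bmp; infer_instance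

def pvWitness_blocking_to_bmp : List String × Int :=
  (["0101010", "0101010", "0101010", "0101010", "0101010",
    "0101010", "0101010", "0101010", "0101010", "0101010"], 1)

def Spec_blocking_to_bmp (bin_code : List String) (side : Int) (out : List (List String)) : Prop := out = blocking_to_bmp_alt bin_code side
instance (bin_code : List String) (side : Int) (out : List (List String)) : Decidable (Spec_blocking_to_bmp bin_code side out) := by unfold Spec_blocking_to_bmp; infer_instance

-- ===== CLAIM (what is proved, stated in full; the proofs are below) =====
def Claim_equal_blocking_to_bmp : Prop := ∀ (bin_code : List String) (side : Int), Dom_blocking_to_bmp bin_code side → Pre_blocking_to_bmp bin_code side → Spec_blocking_to_bmp bin_code side (blocking_to_bmp bin_code side)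

-- ===== LEMMAS AND PROOFS =====

-- ---- string facts ----
theorem strJoin_nil : PySem.Str.join "" [] = "" := rfl

theorem strJoin_cons (a : String) (l : List String) :
    PySem.Str.join "" (a :: l) = a ++ PySem.Str.join "" l := by
  apply String.ext
  simp [PySem.Str.toList_join, PySem.Chars.join, List.intercalate]
  induction l with
  | nil => simp
  | cons b t _ih => simp at *

theorem strJoin_two (a b : String) : PySem.Str.join "" [a, b] = a ++ b := by
  rw [strJoin_cons, strJoin_cons, strJoin_nil]
  apply String.ext; simp

theorem strJoin_three (a b c : String) : PySem.Str.join "" [a, b, c] = a ++ b ++ c := by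
  rw [strJoin_cons, strJoin_two]
  apply String.ext; simp

-- ---- A's data_line is the join of the per-index characters ----
theorem foldl_join_two (f : Int → String) (l : List Int) (s : String) :
    l.foldl (fun line i => PySem.Str.join "" [line, f i]) s = s ++ PySem.Str.join "" (l.map f) := by
  induction l generalizing s with
  | nil => simp [strJoin_nil]
  | cons i l ih =>
      rw [List.foldl_cons, ih, strJoin_two, List.map_cons, strJoin_cons]
      apply String.ext; simp

theorem data_line_eq (bin_code : List String) (side k bit : Int) :
    data_line bin_code side k bit =
      PySem.Str.join "" ((PySem.List.pyRange (k * side) ((k + 1) * side) 1).map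
        (fun i => pyCharAt bin_code i bit)) := by
  unfold data_line
  rw [foldl_join_two]
  apply String.ext; simp

-- ---- slicing the column list is mapping over the index subrange ----
theorem slice_map_pyRange (f : Int → String) (t a b : Int)
    (ha : 0 ≤ a) (hab : a ≤ b) (hbt : b ≤ t) :
    PySem.List.slice ((PySem.List.pyRange 0 t 1).map f) (some a) (some b) =
      (PySem.List.pyRange a b 1).map f := by
  rw [PySem.List.slice_toNat _ ha (le_trans ha hab)]
  apply List.ext_getElem
  · simp [PySem.List.length_pyRange_one]
    omega
  · intro i h1 h2
    simp only [List.getElem_take, List.getElem_drop, List.getElem_map,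
      PySem.List.getElem_pyRange_one]
    congr 1
    push_cast
    omega

-- ---- list modify facts ----
theorem modify_append_cons {α : Type} (done : List α) (c : α) (rest : List α) (f : α → α) :
    (done ++ c :: rest).modify done.length f = done ++ f c :: rest := by
  induction done with
  | nil => simp
  | cons d t ih => simpa using ih

-- ---- canonical descriptions of A's loops ----
def topA (side : Int) : String := pyStrMul (pyStrIdx "01" 1) (side + 2)
def botA (side : Int) : String :=
  pyStrMul (pyStrIdx "01" 1) (PySem.Int.mod side 2) ++ pyStrMul "01" (PySem.Int.truncdiv (side + 2) 2)

def lineA (bin_code : List String) (side x n j : Int) : String :=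
  PySem.Str.join "" [pyStrIdx "01" (PySem.Int.mod j 2), data_line bin_code side n x, pyStrIdx "01" 1]

def blkA (bin_code : List String) (side x n0 : Int) : List String :=
  topA side :: ((PySem.List.pyRange 0 side 1).map (fun j => lineA bin_code side x (n0 + j) j) ++ [botA side])

-- A's j-loop, generalized
theorem jfold_eq (bin_code : List String) (side x : Int) (a b : Int) (hab : a ≤ b)
    (done : List (List String)) (c : List String) (rest : List (List String)) (n0 : Int) :
    (PySem.List.pyRange a b 1).foldl
      (fun (p : List (List String) × Int) j =>
        (p.1.modify done.length
          (· ++ [PySem.Str.join "" [pyStrIdx "01" (PySem.Int.mod j 2), data_line bin_code side p.2 x, pyStrIdx "01" 1]]),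
         p.2 + 1))
      (done ++ c :: rest, n0)
    = (done ++ (c ++ (PySem.List.pyRange a b 1).map (fun j => lineA bin_code side x (n0 + j - a) j)) :: rest,
       n0 + (b - a)) := by
  obtain ⟨m, hm⟩ : ∃ m : Nat, (m : Int) = b - a := ⟨(b - a).toNat, by omega⟩
  induction m generalizing a c n0 with
  | zero =>
      rw [PySem.List.pyRange_one_eq_nil (by omega)]
      simp
      omega
  | succ m ih =>
      have hab' : a < b := by omega
      rw [PySem.List.pyRange_one_cons hab']
      simp only [List.foldl_cons, List.map_cons]
      rw [modify_append_cons]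
      rw [ih (a + 1) (by omega) (c ++ [PySem.Str.join "" [pyStrIdx "01" (PySem.Int.mod a 2), data_line bin_code side n0 x, pyStrIdx "01" 1]]) (n0 + 1) (by omega)]
      rw [Prod.mk.injEq]
      refine ⟨?_, by omega⟩
      have hmap : (PySem.List.pyRange (a + 1) b 1).map (fun j => lineA bin_code side x (n0 + 1 + j - (a + 1)) j)
          = (PySem.List.pyRange (a + 1) b 1).map (fun j => lineA bin_code side x (n0 + j - a) j) := by
        apply List.map_congr_left
        intro j _hj
        have h : n0 + 1 + j - (a + 1) = n0 + j - a := by omega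
        rw [h]
      have hl : PySem.Str.join "" [pyStrIdx "01" (PySem.Int.mod a 2), data_line bin_code side n0 x, pyStrIdx "01" 1]
          = lineA bin_code side x (n0 + a - a) a := by simp [lineA]
      rw [hmap, List.append_assoc, List.singleton_append, hl]

-- one y-iteration of A, under the loop invariant blocks = done ++ [[]] ∧ k = done.length
theorem aYStep_eq (bin_code : List String) (side x : Int) (done : List (List String)) (n0 : Int) (y : Int) :
    aYStep bin_code side x ((done ++ [[]], (done.length : Int)), n0) y
      = ((done ++ blkA bin_code side x n0 :: [[]], (done.length : Int) + 1), n0 + (side.toNat : Int)) := by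
  simp only [aYStep, Int.toNat_natCast]
  rw [show (done ++ [[]]) ++ ([[]] : List (List String)) = done ++ ([] : List String) :: [[]] from by simp]
  rw [modify_append_cons]
  simp only [List.nil_append]
  rcases le_or_gt side 0 with hs | hs
  · rw [PySem.List.pyRange_one_eq_nil hs]
    simp only [List.foldl_nil]
    rw [modify_append_cons]
    have ht : ((side.toNat : Int)) = 0 := by omega
    simp [blkA, topA, botA, PySem.List.pyRange_one_eq_nil hs, ht]
  · rw [jfold_eq bin_code side x 0 side (by omega) done _ [[]] n0]
    rw [modify_append_cons]
    have ht : ((side.toNat : Int)) = side := by omega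
    simp [blkA, topA, botA, ht]

-- A's y-loop
theorem yfold_eq (bin_code : List String) (side x : Int) (m : Nat) (done : List (List String)) (n0 : Int) :
    (PySem.List.pyRange 0 (m : Int) 1).foldl (aYStep bin_code side x) ((done ++ [[]], (done.length : Int)), n0)
      = ((done ++ ((PySem.List.pyRange 0 (m : Int) 1).map
            (fun y => blkA bin_code side x (n0 + (side.toNat : Int) * y)) ++ [[]]),
          (done.length : Int) + m), n0 + (side.toNat : Int) * m) := by
  induction m generalizing done n0 with
  | zero =>
      rw [PySem.List.pyRange_one_eq_nil (by simp)]
      simp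
  | succ m ih =>
      have hcast : ((m + 1 : Nat) : Int) = (m : Int) + 1 := by push_cast; ring
      rw [hcast, PySem.List.pyRange_one_succ_right (by positivity)]
      rw [List.foldl_append, ih done n0]
      rw [List.foldl_cons, List.foldl_nil]
      have hlen : ((done.length : Int) + m) = (((done ++ (PySem.List.pyRange 0 (m : Int) 1).map
          (fun y => blkA bin_code side x (n0 + (side.toNat : Int) * y))).length : Int)) := by
        simp [PySem.List.length_pyRange_one]
      rw [← List.append_assoc, hlen,
        aYStep_eq bin_code side x _ (n0 + (side.toNat : Int) * m) (m : Int)]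
      rw [Prod.mk.injEq, Prod.mk.injEq]
      refine ⟨⟨?_, ?_⟩, by ring⟩
      · rw [List.map_append]
        simp
      · simp [PySem.List.length_pyRange_one]
        ring

-- A's x-loop
theorem xfold_eq (bin_code : List String) (side : Int) (m : Nat) (done : List (List String)) :
    (PySem.List.pyRange 0 (m : Int) 1).foldl
      (fun (st : List (List String) × Int) x =>
        ((PySem.List.pyRange 0 10 1).foldl (aYStep bin_code side x) (st, 0)).1)
      (done ++ [[]], (done.length : Int))
    = (done ++ ((PySem.List.pyRange 0 (m : Int) 1).flatMap
          (fun x => (PySem.List.pyRange 0 10 1).map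
            (fun y => blkA bin_code side x ((side.toNat : Int) * y)))) ++ [[]],
       (done.length : Int) + 10 * m) := by
  induction m generalizing done with
  | zero =>
      simp [PySem.List.pyRange_one_eq_nil]
  | succ m ih =>
      have hcast : ((m + 1 : Nat) : Int) = (m : Int) + 1 := by push_cast; ring
      rw [hcast, PySem.List.pyRange_one_succ_right (by positivity)]
      rw [List.foldl_append, ih done, List.foldl_cons, List.foldl_nil]
      have hlen : ((done.length : Int) + 10 * m) = (((done ++ (PySem.List.pyRange 0 (m : Int) 1).flatMap
          (fun x => (PySem.List.pyRange 0 10 1).map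
            (fun y => blkA bin_code side x ((side.toNat : Int) * y)))).length : Int)) := by
        simp [List.length_flatMap, List.map_const', List.sum_replicate, PySem.List.length_pyRange_one]
        ring
      rw [hlen]
      rw [show (PySem.List.pyRange 0 10 1 : List Int) = PySem.List.pyRange 0 ((10 : Nat) : Int) 1 from by norm_num]
      rw [yfold_eq bin_code side (m : Int) 10 _ 0]
      rw [Prod.mk.injEq]
      refine ⟨?_, ?_⟩
      · rw [List.flatMap_append]
        simp [List.append_assoc]
      · simp only [Nat.cast_ofNat]
        rw [← hlen]
        ring

theorem portA_eq (bin_code : List String) (side : Int) :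
    blocking_to_bmp bin_code side
      = (PySem.List.pyRange 0 7 1).flatMap
          (fun x => (PySem.List.pyRange 0 10 1).map
            (fun y => blkA bin_code side x ((side.toNat : Int) * y))) := by
  show PySem.List.slice ((PySem.List.pyRange 0 7 1).foldl
      (fun (st : List (List String) × Int) x =>
        ((PySem.List.pyRange 0 10 1).foldl (aYStep bin_code side x) (st, 0)).1)
      ([[]], 0)).1 none (some (-1)) = _
  rw [show (PySem.List.pyRange 0 7 1 : List Int) = PySem.List.pyRange 0 ((7 : Nat) : Int) 1 from by norm_num]
  rw [show (([[]] : List (List String)), (0 : Int)) = (([] : List (List String)) ++ [[]], ((([] : List (List String)).length : Nat) : Int)) from by simp]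
  rw [xfold_eq bin_code side 7 []]
  rw [PySem.List.slice_to_neg_one, List.dropLast_concat, List.nil_append]

theorem pyStrIdx01_one : pyStrIdx "01" 1 = "1" := rfl

theorem lineB_eq (bin_code : List String) (side x y j : Int)
    (hy0 : 0 ≤ y) (hy : y < 10) (hj0 : 0 ≤ j) (hj : j < side) :
    pyStrIdx "01" (PySem.Int.mod j 2) ++
      PySem.Str.join "" (PySem.List.slice
        ((PySem.List.pyRange 0 (10 * side * side) 1).map (fun i => pyCharAt bin_code i x))
        (some ((y * side + j) * side)) (some ((y * side + j + 1) * side))) ++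
      pyStrIdx "01" 1
    = lineA bin_code side x ((side.toNat : Int) * y + j) j := by
  have hs : 0 < side := lt_of_le_of_lt hj0 hj
  have hts : ((side.toNat : Int)) = side := by omega
  have hn0 : 0 ≤ y * side + j := by positivity
  have h1 : y * side ≤ 9 * side := by nlinarith
  have h2 : y * side + j + 1 ≤ 10 * side := by linarith
  have h3 : (y * side + j + 1) * side ≤ 10 * side * side := by
    nlinarith [mul_le_mul_of_nonneg_right h2 hs.le]
  rw [slice_map_pyRange _ _ _ _ (by positivity) (by nlinarith) h3]
  rw [lineA, strJoin_three, data_line_eq]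
  rw [show (side.toNat : Int) * y + j = y * side + j from by rw [hts]; ring]

theorem portB_eq (bin_code : List String) (side : Int) :
    blocking_to_bmp_alt bin_code side
      = (PySem.List.pyRange 0 7 1).flatMap
          (fun x => (PySem.List.pyRange 0 10 1).map
            (fun y => blkA bin_code side x ((side.toNat : Int) * y))) := by
  show (PySem.List.pyRange 0 7 1).foldl
      (fun blocks x =>
        (PySem.List.pyRange 0 10 1).foldl
          (fun blocks y =>
            blocks ++ [(PySem.List.pyRange 0 side 1).foldl
              (fun block j =>
                block ++ [pyStrIdx "01" (PySem.Int.mod j 2) ++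
                  PySem.Str.join "" (PySem.List.slice
                    ((PySem.List.pyRange 0 (if side > 0 then 10 * side * side else 0) 1).map
                      (fun i => pyCharAt bin_code i x))
                    (some ((y * side + j) * side)) (some ((y * side + j + 1) * side))) ++
                  pyStrIdx "01" 1])
              [pyStrMul "1" (side + 2)] ++
              [pyStrMul "1" (PySem.Int.mod side 2) ++ pyStrMul "01" (PySem.Int.truncdiv (side + 2) 2)]])
          blocks)
      [] = _
  simp only [PySem.List.foldl_append_singleton_eq_map, PySem.List.foldl_append_eq_flatMap,
    List.nil_append]
  congr 1
  funext x
  apply List.map_congr_left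
  intro y hy
  rw [PySem.List.mem_pyRange_one] at hy
  rcases le_or_gt side 0 with hs | hs
  · simp [blkA, topA, botA, pyStrIdx01_one, PySem.List.pyRange_one_eq_nil hs]
  · have hif : (if side > 0 then 10 * side * side else 0) = 10 * side * side := if_pos hs
    simp only [hif]
    have hmap : (PySem.List.pyRange 0 side 1).map
        (fun j => pyStrIdx "01" (PySem.Int.mod j 2) ++
          PySem.Str.join "" (PySem.List.slice
            ((PySem.List.pyRange 0 (10 * side * side) 1).map (fun i => pyCharAt bin_code i x))
            (some ((y * side + j) * side)) (some ((y * side + j + 1) * side))) ++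
          pyStrIdx "01" 1)
        = (PySem.List.pyRange 0 side 1).map
            (fun j => lineA bin_code side x ((side.toNat : Int) * y + j) j) := by
      apply List.map_congr_left
      intro j hj
      rw [PySem.List.mem_pyRange_one] at hj
      exact lineB_eq bin_code side x y j hy.1 hy.2 hj.1 hj.2
    rw [hmap]
    simp [blkA, topA, botA, pyStrIdx01_one]

-- ===== VERDICT (by name: the statement is the Claim_ definition above) =====
theorem blocking_to_bmp_spec : Claim_equal_blocking_to_bmp := by
  intro bin_code side _ _
  unfold Spec_blocking_to_bmp
  rw [portA_eq, portB_eq]
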